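-- pv_equiv track=rewrite | github.com/ShadowChaserSama/task2 | task1.py | halves_sums_equal
-- ===== SOURCE A (Python) =====
-- def halves_sums_equal(n):
--     s = str(abs(int(n)))  # mənfi ədəd olsa da işləsin
--     L = len(s)
--
--     if L % 2 == 0:
--         return "Sehv: cut reqem sayli eded daxil edilib!"
--
--     mid = L // 2
--     left = s[:mid]
--     right = s[mid+1:]
--
--     sum_left = sum(int(ch) for ch in left)
--     sum_right = sum(int(ch) for ch in right)
--
--     if sum_left == sum_right:
--         return "Beredir ✅"
--     else:
--         return "Beraber deyil ❌"
-- ===== SOURCE B (Python) =====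
-- def halves_sums_equal(n):
--     # Pure integer arithmetic: no string of digits is ever built.
--     m = abs(int(n))
--     # count the decimal digits of m
--     L = 1
--     t = m
--     while t >= 10:
--         t //= 10
--         L += 1
--
--     if L % 2 == 0:
--         return "Sehv: cut reqem sayli eded daxil edilib!"
--
--     mid = L // 2
--     # pop the low `mid` digits: they are the right half
--     sum_right = 0
--     for _ in range(mid):
--         m, d = divmod(m, 10)
--         sum_right += d
--     m //= 10  # discard the middle digit
--     # what is left are the digits of the left half
--     sum_left = 0
--     while m:
--         m, d = divmod(m, 10)
--         sum_left += d
--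
--     if sum_left == sum_right:
--         return "Beredir ✅"
--     else:
--         return "Beraber deyil ❌"
-- ===== Notes on version B (the rewrite author's own statement) =====
-- stated objective: alternative
-- what changed: Replaces A's string pipeline (str(abs(n)), slicing off both halves, summing int(ch) over each slice) with pure integer arithmetic: the digit count is found by repeated integer division, the right-half sum by popping the low digits with divmod, the middle digit is discarded by one more division, and the left-half sum is the digit sum of the remaining quotient; no digit string is ever built.
import Mathlib
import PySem

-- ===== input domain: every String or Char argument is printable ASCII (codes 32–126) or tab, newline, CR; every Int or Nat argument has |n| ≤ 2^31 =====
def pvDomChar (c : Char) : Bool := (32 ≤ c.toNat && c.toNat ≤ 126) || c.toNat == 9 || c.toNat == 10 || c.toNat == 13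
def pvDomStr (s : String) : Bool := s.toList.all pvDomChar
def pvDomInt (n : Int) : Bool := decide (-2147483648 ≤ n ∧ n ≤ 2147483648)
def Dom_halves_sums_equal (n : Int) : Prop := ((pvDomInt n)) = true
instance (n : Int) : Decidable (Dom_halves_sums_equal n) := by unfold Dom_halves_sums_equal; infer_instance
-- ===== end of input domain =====

-- ===== PORT A =====
-- B replaces A's string pipeline (str, two slices, two generator sums) by pure integer
-- arithmetic (digit count and digit sums via repeated divmod); objective: alternative.
-- int(ch) on a single character: exact on digit characters, which is all str(abs(n)) contains
def pvDig (c : Char) : Int := (c.toNat : Int) - 48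

def halves_sums_equal (n : Int) : String :=
  -- s = str(abs(int(n))); string ops below are on its char list (PySem.Chars definitions)
  let s : List Char := PySem.Int.toChars |n|
  let L : Int := s.length
  if PySem.Int.mod L 2 = 0 then "Sehv: cut reqem sayli eded daxil edilib!"
  else
    let mid : Int := PySem.Int.floordiv L 2
    let left := PySem.List.slice s none (some mid)
    let right := PySem.List.slice s (some (mid + 1)) none
    let sum_left := (left.map pvDig).sum
    let sum_right := (right.map pvDig).sum
    if sum_left = sum_right then "Beredir ✅" else "Beraber deyil ❌"

-- ===== PORT B =====
-- `while t >= 10: t //= 10; L += 1` as the obvious recursion over the same state (t, L)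
def pvDigCountAux (t L : Nat) : Nat :=
  if 10 ≤ t then pvDigCountAux (t / 10) (L + 1) else L
  decreasing_by exact Nat.div_lt_self (by omega) (by omega)

-- `for _ in range(mid): m, d = divmod(m, 10); sum_right += d` as recursion on the trip count
def pvPopLoop : Nat → Nat × Int → Nat × Int
  | 0, st => st
  | k + 1, st => pvPopLoop k (st.1 / 10, st.2 + ((st.1 % 10 : Nat) : Int))

-- `while m: m, d = divmod(m, 10); sum_left += d` as recursion over the same state (m, s)
def pvSumAllAux (m : Nat) (s : Int) : Int :=
  if m = 0 then s else pvSumAllAux (m / 10) (s + ((m % 10 : Nat) : Int))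
  decreasing_by exact Nat.div_lt_self (by omega) (by omega)

def halves_sums_equal_alt (n : Int) : String :=
  let m : Nat := n.natAbs          -- abs(int(n)): a nonnegative integer
  let L : Nat := pvDigCountAux m 1
  if L % 2 = 0 then "Sehv: cut reqem sayli eded daxil edilib!"
  else
    let mid : Nat := L / 2
    let p := pvPopLoop mid (m, 0)  -- (m after popping mid digits, sum_right)
    let sum_right := p.2
    let m2 := p.1 / 10             -- m //= 10 : discard the middle digit
    let sum_left := pvSumAllAux m2 0
    if sum_left = sum_right then "Beredir ✅" else "Beraber deyil ❌"

-- ===== PRECONDITION & SPEC =====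
def Spec_halves_sums_equal (n : Int) (out : String) : Prop := out = halves_sums_equal_alt n
instance (n : Int) (out : String) : Decidable (Spec_halves_sums_equal n out) := by unfold Spec_halves_sums_equal; infer_instance

-- ===== CLAIM (what is proved, stated in full; the proofs are below) =====
def Claim_equal_halves_sums_equal : Prop := ∀ (n : Int), Dom_halves_sums_equal n → Spec_halves_sums_equal n (halves_sums_equal n)

-- ===== LEMMAS AND PROOFS =====

-- decimal representation of a natural number, most significant digit first
def pvRep (n : Nat) : List Char :=
  if n < 10 then [Nat.digitChar n] else pvRep (n / 10) ++ [Nat.digitChar (n % 10)]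
  decreasing_by exact Nat.div_lt_self (by omega) (by omega)

-- the low k digits of n, most significant first
def pvLow : Nat → Nat → List Char
  | _, 0 => []
  | n, k + 1 => pvLow (n / 10) k ++ [Nat.digitChar (n % 10)]

lemma pvToDigitsCore_eq_rep : ∀ (fuel n : Nat) (ds : List Char), n < fuel →
    Nat.toDigitsCore 10 fuel n ds = pvRep n ++ ds := by
  intro fuel
  induction fuel with
  | zero => intro n ds h; omega
  | succ fuel ih =>
    intro n ds h
    rw [Nat.toDigitsCore]
    by_cases h0 : n / 10 = 0
    · have hn : n < 10 := by omega
      rw [if_pos h0, pvRep, if_pos hn, Nat.mod_eq_of_lt hn]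
      rfl
    · have hn : ¬ n < 10 := by omega
      rw [if_neg h0, ih (n / 10) _ (by omega)]
      conv_rhs => rw [pvRep, if_neg hn]
      rw [List.append_assoc]
      rfl

lemma pvToChars_abs (n : Int) : PySem.Int.toChars |n| = pvRep n.natAbs := by
  rw [Int.abs_eq_natAbs]
  have h : ¬ ((n.natAbs : Int) < 0) := by omega
  simp only [PySem.Int.toChars, if_neg h, Nat.toDigits, Int.toNat_natCast]
  rw [pvToDigitsCore_eq_rep _ _ _ (by omega), List.append_nil]

lemma pvLen_rep (n : Nat) :
    (pvRep n).length = if n < 10 then 1 else (pvRep (n / 10)).length + 1 := by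
  rw [pvRep]; split <;> simp

lemma pvLen_rep_pos (n : Nat) : 1 ≤ (pvRep n).length := by
  rw [pvLen_rep]; split <;> omega

lemma pvDigCountAux_eq : ∀ (t L : Nat), pvDigCountAux t L = (pvRep t).length + L - 1 := by
  intro t
  induction t using Nat.strong_induction_on with
  | _ t ih =>
    intro L
    rw [pvDigCountAux, pvLen_rep]
    by_cases h : 10 ≤ t
    · rw [if_pos h, if_neg (by omega), ih (t / 10) (Nat.div_lt_self (by omega) (by omega))]
      have := pvLen_rep_pos (t / 10)
      omega
    · rw [if_neg h, if_pos (by omega)]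
      omega

lemma pvDig_digitChar (d : Nat) (h : d < 10) : pvDig (Nat.digitChar d) = (d : Int) := by
  interval_cases d <;> decide

lemma pvSum_rep (n : Nat) :
    ((pvRep n).map pvDig).sum
      = if n = 0 then 0 else ((n % 10 : Nat) : Int) + ((pvRep (n / 10)).map pvDig).sum := by
  by_cases h0 : n = 0
  · subst h0
    rw [pvRep]
    simp only [if_pos (show (0 : Nat) < 10 by omega)]
    decide
  · rw [if_neg h0]
    by_cases h : n < 10
    · conv_lhs => rw [pvRep, if_pos h]
      rw [Nat.mod_eq_of_lt h, Nat.div_eq_of_lt h, pvRep]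
      simp only [if_pos (show (0 : Nat) < 10 by omega), List.map_cons, List.map_nil,
        List.sum_cons, List.sum_nil, pvDig_digitChar n h,
        pvDig_digitChar 0 (by omega)]
      push_cast
      ring
    · conv_lhs => rw [pvRep, if_neg h]
      simp only [List.map_append, List.sum_append, List.map_cons, List.map_nil,
        List.sum_cons, List.sum_nil, pvDig_digitChar (n % 10) (Nat.mod_lt _ (by omega))]
      ring

lemma pvSumAllAux_eq : ∀ (n : Nat) (s : Int),
    pvSumAllAux n s = s + ((pvRep n).map pvDig).sum := by
  intro n
  induction n using Nat.strong_induction_on with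
  | _ n ih =>
    intro s
    rw [pvSumAllAux, pvSum_rep]
    by_cases h0 : n = 0
    · simp [h0]
    · rw [if_neg h0, if_neg h0, ih (n / 10) (Nat.div_lt_self (by omega) (by omega))]
      ring

lemma pvLen_low : ∀ (k n : Nat), (pvLow n k).length = k := by
  intro k
  induction k with
  | zero => intro n; rfl
  | succ k ih => intro n; simp [pvLow, ih]

lemma pvRep_split : ∀ (k n : Nat), k < (pvRep n).length →
    pvRep n = pvRep (n / 10 ^ k) ++ pvLow n k := by
  intro k
  induction k with
  | zero => intro n _; simp [pvLow]
  | succ k ih =>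
    intro n h
    have hn : ¬ n < 10 := by
      intro hc
      rw [pvLen_rep, if_pos hc] at h
      omega
    have hlen : (pvRep n).length = (pvRep (n / 10)).length + 1 := by
      rw [pvLen_rep, if_neg hn]
    rw [pvRep, if_neg hn, ih (n / 10) (by omega)]
    have hq : n / 10 / 10 ^ k = n / 10 ^ (k + 1) := by
      rw [Nat.div_div_eq_div_mul, pow_succ, mul_comm (10 ^ k) 10]
    rw [hq, List.append_assoc]
    rfl

lemma pvPopLoop_eq : ∀ (k n : Nat) (s : Int),
    pvPopLoop k (n, s) = (n / 10 ^ k, s + ((pvLow n k).map pvDig).sum) := by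
  intro k
  induction k with
  | zero => intro n s; simp [pvPopLoop, pvLow]
  | succ k ih =>
    intro n s
    rw [pvPopLoop]
    dsimp only
    rw [ih]
    have hq : n / 10 / 10 ^ k = n / 10 ^ (k + 1) := by
      rw [Nat.div_div_eq_div_mul, pow_succ, mul_comm (10 ^ k) 10]
    rw [hq]
    simp only [pvLow, List.map_append, List.sum_append, List.map_cons, List.map_nil,
      List.sum_cons, List.sum_nil, pvDig_digitChar (n % 10) (Nat.mod_lt _ (by omega)),
      Prod.mk.injEq, true_and]
    ring

-- ===== VERDICT (by name: the statement is the Claim_ definition above) =====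
theorem halves_sums_equal_spec : Claim_equal_halves_sums_equal := by
  intro n _
  unfold Spec_halves_sums_equal halves_sums_equal halves_sums_equal_alt
  rw [pvToChars_abs]
  set m : Nat := n.natAbs with hm
  dsimp only
  rw [pvDigCountAux_eq]
  set LN : Nat := (pvRep m).length with hLN
  have hL1 : 1 ≤ LN := pvLen_rep_pos m
  rw [show LN + 1 - 1 = LN by omega]
  have hmodc : PySem.Int.mod (LN : Int) 2 = ((LN % 2 : Nat) : Int) := by
    exact_mod_cast PySem.Int.mod_natCast LN 2
  rw [hmodc]
  by_cases hpar : LN % 2 = 0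
  · rw [if_pos (by exact_mod_cast congrArg (Nat.cast : Nat → Int) hpar), if_pos hpar]
  · have hne : ((LN % 2 : Nat) : Int) ≠ 0 := by
      intro hc; exact hpar (by exact_mod_cast hc)
    rw [if_neg hne, if_neg hpar]
    set mid : Nat := LN / 2 with hmid
    have hdivc : PySem.Int.floordiv (LN : Int) 2 = ((mid : Nat) : Int) := by
      exact_mod_cast PySem.Int.floordiv_natCast LN 2
    rw [hdivc, PySem.List.slice_to_natCast (pvRep m) mid,
      show ((mid : Nat) : Int) + 1 = (((mid + 1 : Nat)) : Int) by push_cast; ring,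
      PySem.List.slice_from_natCast (pvRep m) (mid + 1)]
    have hLodd : LN = 2 * mid + 1 := by omega
    rw [pvPopLoop_eq]
    dsimp only
    have hsplit : pvRep m = pvRep (m / 10 ^ mid) ++ pvLow m mid := pvRep_split mid m (by omega)
    have hlenhi : (pvRep (m / 10 ^ mid)).length = mid + 1 := by
      have := congrArg List.length hsplit
      rw [List.length_append, pvLen_low] at this
      omega
    have hdrop : (pvRep m).drop (mid + 1) = pvLow m mid := by
      conv_lhs => rw [hsplit, ← hlenhi]
      exact List.drop_left
    by_cases hmid0 : mid = 0
    · -- single-digit number: both halves are empty, B's loops see m < 10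
      have hm10 : m < 10 := by
        by_contra hge
        have h2 := pvLen_rep m
        rw [if_neg (by omega)] at h2
        have := pvLen_rep_pos (m / 10)
        omega
      simp only [hmid0] at hdrop ⊢
      rw [hdrop]
      simp only [List.take_zero, List.map_nil, List.sum_nil, pow_zero, Nat.div_one,
        Nat.div_eq_of_lt hm10]
      rw [pvSumAllAux]
      simp [pvLow]
    · -- mid ≥ 1: the left half is exactly the representation of m / 10^mid / 10
      have hsplit1 : pvRep (m / 10 ^ mid)
          = pvRep (m / 10 ^ mid / 10) ++ pvLow (m / 10 ^ mid) 1 := by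
        have := pvRep_split 1 (m / 10 ^ mid) (by omega)
        rwa [pow_one] at this
      have hlenlo : (pvRep (m / 10 ^ mid / 10)).length = mid := by
        have := congrArg List.length hsplit1
        rw [List.length_append, pvLen_low] at this
        omega
      have htake : (pvRep m).take mid = pvRep (m / 10 ^ mid / 10) := by
        rw [hsplit, List.take_append_of_le_length (by omega), hsplit1,
          List.take_append_of_le_length (by omega), List.take_of_length_le (by omega)]
      rw [htake, hdrop, pvSumAllAux_eq]
      simp only [zero_add]
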